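-- pv_equiv track=rewrite | github.com/aniketnagarnaik/stock_ticker_generator | business/rrg_calculator.py | get_quadrant_summary
-- ===== SOURCE A (Python) =====
-- from typing import Dict, List, Optional, Tuple
--
-- def get_quadrant_summary(rrg_data: List[Dict]) -> Dict:
--     """Get summary of ETFs in each quadrant"""
--     summary = {
--         'Leading': [],
--         'Weakening': [],
--         'Lagging': [],
--         'Improving': []
--     }
--
--     for etf in rrg_data:
--         quadrant = etf.get('quadrant', 'Unknown')
--         if quadrant in summary:
--             summary[quadrant].append(etf)
--
--     return summary
-- ===== SOURCE B (Python) =====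
-- def get_quadrant_summary(rrg_data):
--     """Get summary of ETFs in each quadrant"""
--     return {
--         quadrant: [etf for etf in rrg_data
--                    if etf.get('quadrant', 'Unknown') == quadrant]
--         for quadrant in ('Leading', 'Weakening', 'Lagging', 'Improving')
--     }
-- ===== Notes on version B (the rewrite author's own statement) =====
-- stated objective: idiomatic
-- what changed: Replaces the single scatter pass that appends each ETF into its bucket via dict lookup with a dict comprehension over the four fixed quadrant names, each built by an independent filtering scan of the list.
import Mathlib
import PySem

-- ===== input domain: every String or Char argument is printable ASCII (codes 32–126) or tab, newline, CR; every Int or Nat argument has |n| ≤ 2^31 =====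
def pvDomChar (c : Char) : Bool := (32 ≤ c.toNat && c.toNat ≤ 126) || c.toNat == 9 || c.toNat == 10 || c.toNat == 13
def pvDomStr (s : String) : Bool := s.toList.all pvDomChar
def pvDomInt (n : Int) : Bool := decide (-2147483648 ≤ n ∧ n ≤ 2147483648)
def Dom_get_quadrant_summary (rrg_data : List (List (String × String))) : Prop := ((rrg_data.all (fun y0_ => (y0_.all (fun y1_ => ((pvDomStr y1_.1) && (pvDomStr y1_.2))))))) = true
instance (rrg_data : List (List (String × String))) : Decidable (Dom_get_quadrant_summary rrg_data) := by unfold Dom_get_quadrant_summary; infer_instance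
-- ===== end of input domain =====

-- B groups by four filtering scans instead of A's single scatter pass into dict buckets (same cost class).

-- ===== PORT A =====
-- one scatter pass: look up each ETF's quadrant and append it into its bucket if the bucket exists
def get_quadrant_summary (rrg_data : List (List (String × String))) : List (String × List (List (String × String))) :=
  let summary : PySem.Dict String (List (List (String × String))) :=
    PySem.Dict.ofList [("Leading", []), ("Weakening", []), ("Lagging", []), ("Improving", [])]
  let summary := rrg_data.foldl (fun s etf =>
    let quadrant := (PySem.Dict.mk etf).getD "quadrant" "Unknown"
    if s.contains quadrant then s.modify quadrant [] (fun l => l ++ [etf]) else s) summary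
  summary.items

-- ===== PORT B =====
-- four independent filtering scans, one per fixed quadrant name
def get_quadrant_summary_alt (rrg_data : List (List (String × String))) : List (String × List (List (String × String))) :=
  ["Leading", "Weakening", "Lagging", "Improving"].map (fun q =>
    (q, rrg_data.filter (fun etf => (PySem.Dict.mk etf).getD "quadrant" "Unknown" == q)))

-- ===== PRECONDITION & SPEC =====
def Spec_get_quadrant_summary (rrg_data : List (List (String × String))) (out : List (String × List (List (String × String)))) : Prop := out = get_quadrant_summary_alt rrg_data
instance (rrg_data : List (List (String × String))) (out : List (String × List (List (String × String)))) : Decidable (Spec_get_quadrant_summary rrg_data out) := by unfold Spec_get_quadrant_summary; infer_instance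

-- ===== CLAIM (what is proved, stated in full; the proofs are below) =====
def Claim_equal_get_quadrant_summary : Prop := ∀ (rrg_data : List (List (String × String))), Dom_get_quadrant_summary rrg_data → Spec_get_quadrant_summary rrg_data (get_quadrant_summary rrg_data)

-- ===== LEMMAS AND PROOFS =====

-- invariant of A's scatter loop over the fixed four-bucket dict
theorem pv_loop (rrg : List (List (String × String)))
    (l1 l2 l3 l4 : List (List (String × String))) :
    (rrg.foldl (fun s etf =>
        let quadrant := (PySem.Dict.mk etf).getD "quadrant" "Unknown"
        if s.contains quadrant then s.modify quadrant [] (fun l => l ++ [etf]) else s)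
      (PySem.Dict.mk [("Leading", l1), ("Weakening", l2), ("Lagging", l3), ("Improving", l4)])).items
    = [("Leading", l1 ++ rrg.filter (fun e => (PySem.Dict.mk e).getD "quadrant" "Unknown" == "Leading")),
       ("Weakening", l2 ++ rrg.filter (fun e => (PySem.Dict.mk e).getD "quadrant" "Unknown" == "Weakening")),
       ("Lagging", l3 ++ rrg.filter (fun e => (PySem.Dict.mk e).getD "quadrant" "Unknown" == "Lagging")),
       ("Improving", l4 ++ rrg.filter (fun e => (PySem.Dict.mk e).getD "quadrant" "Unknown" == "Improving"))] := by
  induction rrg generalizing l1 l2 l3 l4 with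
  | nil => simp
  | cons etf rest ih =>
    simp only [List.foldl_cons, List.filter_cons]
    generalize hq : (PySem.Dict.mk etf).getD "quadrant" "Unknown" = q
    by_cases h1 : q = "Leading"
    · subst h1
      have hc : (PySem.Dict.mk [("Leading", l1), ("Weakening", l2), ("Lagging", l3), ("Improving", l4)]).contains "Leading" = true := by
        simp [PySem.Dict.contains]
      have hm : (PySem.Dict.mk [("Leading", l1), ("Weakening", l2), ("Lagging", l3), ("Improving", l4)]).modify "Leading" [] (fun l => l ++ [etf]) = PySem.Dict.mk [("Leading", l1 ++ [etf]), ("Weakening", l2), ("Lagging", l3), ("Improving", l4)] := by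
        simp [PySem.Dict.modify, PySem.Dict.insert, PySem.Dict.contains, PySem.Dict.getD_eq_get?_getD, PySem.Dict.get?_mk_cons]
      simp only [hc, if_true, hm]
      simpa using ih (l1 ++ [etf]) l2 l3 l4
    · by_cases h2 : q = "Weakening"
      · subst h2
        have hc : (PySem.Dict.mk [("Leading", l1), ("Weakening", l2), ("Lagging", l3), ("Improving", l4)]).contains "Weakening" = true := by
          simp [PySem.Dict.contains]
        have hm : (PySem.Dict.mk [("Leading", l1), ("Weakening", l2), ("Lagging", l3), ("Improving", l4)]).modify "Weakening" [] (fun l => l ++ [etf]) = PySem.Dict.mk [("Leading", l1), ("Weakening", l2 ++ [etf]), ("Lagging", l3), ("Improving", l4)] := by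
          simp [PySem.Dict.modify, PySem.Dict.insert, PySem.Dict.contains, PySem.Dict.getD_eq_get?_getD, PySem.Dict.get?_mk_cons]
        simp only [hc, if_true, hm]
        simpa using ih l1 (l2 ++ [etf]) l3 l4
      · by_cases h3 : q = "Lagging"
        · subst h3
          have hc : (PySem.Dict.mk [("Leading", l1), ("Weakening", l2), ("Lagging", l3), ("Improving", l4)]).contains "Lagging" = true := by
            simp [PySem.Dict.contains]
          have hm : (PySem.Dict.mk [("Leading", l1), ("Weakening", l2), ("Lagging", l3), ("Improving", l4)]).modify "Lagging" [] (fun l => l ++ [etf]) = PySem.Dict.mk [("Leading", l1), ("Weakening", l2), ("Lagging", l3 ++ [etf]), ("Improving", l4)] := by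
            simp [PySem.Dict.modify, PySem.Dict.insert, PySem.Dict.contains, PySem.Dict.getD_eq_get?_getD, PySem.Dict.get?_mk_cons]
          simp only [hc, if_true, hm]
          simpa using ih l1 l2 (l3 ++ [etf]) l4
        · by_cases h4 : q = "Improving"
          · subst h4
            have hc : (PySem.Dict.mk [("Leading", l1), ("Weakening", l2), ("Lagging", l3), ("Improving", l4)]).contains "Improving" = true := by
              simp [PySem.Dict.contains]
            have hm : (PySem.Dict.mk [("Leading", l1), ("Weakening", l2), ("Lagging", l3), ("Improving", l4)]).modify "Improving" [] (fun l => l ++ [etf]) = PySem.Dict.mk [("Leading", l1), ("Weakening", l2), ("Lagging", l3), ("Improving", l4 ++ [etf])] := by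
              simp [PySem.Dict.modify, PySem.Dict.insert, PySem.Dict.contains, PySem.Dict.getD_eq_get?_getD, PySem.Dict.get?_mk_cons]
            simp only [hc, if_true, hm]
            simpa using ih l1 l2 l3 (l4 ++ [etf])
          · have h1' : ¬ ("Leading" = q) := fun h => h1 h.symm
            have h2' : ¬ ("Weakening" = q) := fun h => h2 h.symm
            have h3' : ¬ ("Lagging" = q) := fun h => h3 h.symm
            have h4' : ¬ ("Improving" = q) := fun h => h4 h.symm
            have hc : (PySem.Dict.mk [("Leading", l1), ("Weakening", l2), ("Lagging", l3), ("Improving", l4)]).contains q = false := by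
              simp [PySem.Dict.contains, h1', h2', h3', h4']
            simp only [hc, if_false, Bool.false_eq_true]
            simpa [h1, h2, h3, h4] using ih l1 l2 l3 l4

-- ===== VERDICT (by name: the statement is the Claim_ definition above) =====
theorem get_quadrant_summary_spec : Claim_equal_get_quadrant_summary := by
  intro rrg _
  unfold Spec_get_quadrant_summary get_quadrant_summary get_quadrant_summary_alt
  have h := pv_loop rrg [] [] [] []
  simpa [PySem.Dict.ofList] using h
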